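-- pv_equiv track=rewrite | github.com/jirikvita/delphesAnalysis | python/BumpSignifTools.py | BinNeighboursUsedBins2D
-- ===== SOURCE A (Python) =====
-- def BinNeighboursUsedBins2D(ibin,jbin, usedbins):
--     imin,imax = ibin-1,ibin+2
--     for i in range(imin,imax):
--         if i < 0 or i >= len(usedbins):
--             continue
--         jmin,jmax = jbin-1,jbin+2
--         for j in range(jmin,jmax):
--             if j < 0 or j >= len(usedbins[i]):
--                 continue
--             # skip the tested bin itself
--             if ibin == i and jbin == j:
--                 continue
--             # skip diagonal neighbouring
--             if abs(i - ibin) > 0 and abs(j - jbin) > 0: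
--                 continue
--             if usedbins[i][j] == 1:
--                 return True
--     return False
-- ===== SOURCE B (Python) =====
-- def BinNeighboursUsedBins2D(ibin, jbin, usedbins):
--     for di, dj in ((-1, 0), (1, 0), (0, -1), (0, 1)):
--         i, j = ibin + di, jbin + dj
--         if 0 <= i < len(usedbins) and 0 <= j < len(usedbins[i]) and usedbins[i][j] == 1:
--             return True
--     return False
-- ===== Notes on version B (the rewrite author's own statement) =====
-- stated objective: simpler
-- what changed: Replaced the nested 3x3 range scan with its self-skip and diagonal-skip branches by a direct enumeration of the four orthogonal neighbour offsets, each checked with one bounds-and-value test.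
import Mathlib
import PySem

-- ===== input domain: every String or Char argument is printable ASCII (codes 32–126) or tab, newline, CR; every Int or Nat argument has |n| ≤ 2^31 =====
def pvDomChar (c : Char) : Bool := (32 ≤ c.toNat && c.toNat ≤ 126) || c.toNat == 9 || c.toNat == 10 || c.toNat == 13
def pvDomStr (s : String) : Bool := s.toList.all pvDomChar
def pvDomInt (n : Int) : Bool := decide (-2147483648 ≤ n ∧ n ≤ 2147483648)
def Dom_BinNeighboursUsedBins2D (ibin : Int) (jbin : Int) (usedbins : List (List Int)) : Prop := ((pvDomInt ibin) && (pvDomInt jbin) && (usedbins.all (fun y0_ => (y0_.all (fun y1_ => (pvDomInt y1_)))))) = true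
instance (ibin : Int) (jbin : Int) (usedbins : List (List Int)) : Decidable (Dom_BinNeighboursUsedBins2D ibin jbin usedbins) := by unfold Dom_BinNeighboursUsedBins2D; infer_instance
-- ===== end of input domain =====

-- B replaces A's 3×3 nested scan (with self/diagonal skip branches) by a direct
-- enumeration of the four orthogonal neighbour offsets: simpler, same cost.

-- B replaces A's 3x3 nested scan (with self-skip and diagonal-skip branches) by a direct
-- enumeration of the four orthogonal neighbour offsets; return-value equivalence, same cost.

-- ===== PORT A =====
-- literal transliteration of A: nested range loops, the guards/`continue`s in source
-- order, early `return True` rendered by List.any (the loop body is pure).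
def BinNeighboursUsedBins2D (ibin : Int) (jbin : Int) (usedbins : List (List Int)) : Bool :=
  (PySem.List.pyRange (ibin - 1) (ibin + 2) 1).any (fun i =>
    if i < 0 ∨ i ≥ (usedbins.length : Int) then false
    else
      (PySem.List.pyRange (jbin - 1) (jbin + 2) 1).any (fun j =>
        if j < 0 ∨ j ≥ ((PySem.List.pyGetD usedbins i []).length : Int) then false
        else if ibin = i ∧ jbin = j then false
        else if 0 < |i - ibin| ∧ 0 < |j - jbin| then false
        else PySem.List.pyGetD (PySem.List.pyGetD usedbins i []) j 0 == 1))

-- ===== PORT B =====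
-- B's per-cell test: 0 <= i < len(usedbins) and 0 <= j < len(usedbins[i]) and usedbins[i][j] == 1
def pvCellUsed (usedbins : List (List Int)) (i : Int) (j : Int) : Bool :=
  decide (0 ≤ i) && decide (i < (usedbins.length : Int)) &&
    (let row := PySem.List.pyGetD usedbins i []
     decide (0 ≤ j) && decide (j < (row.length : Int)) && (PySem.List.pyGetD row j 0 == 1))

def BinNeighboursUsedBins2D_alt (ibin : Int) (jbin : Int) (usedbins : List (List Int)) : Bool :=
  ([((-1 : Int), (0 : Int)), (1, 0), (0, -1), (0, 1)]).any (fun d =>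
    pvCellUsed usedbins (ibin + d.1) (jbin + d.2))

-- ===== PRECONDITION & SPEC =====
def Spec_BinNeighboursUsedBins2D (ibin : Int) (jbin : Int) (usedbins : List (List Int)) (out : Bool) : Prop := out = BinNeighboursUsedBins2D_alt ibin jbin usedbins
instance (ibin : Int) (jbin : Int) (usedbins : List (List Int)) (out : Bool) : Decidable (Spec_BinNeighboursUsedBins2D ibin jbin usedbins out) := by unfold Spec_BinNeighboursUsedBins2D; infer_instance

-- ===== CLAIM (what is proved, stated in full; the proofs are below) =====
def Claim_equal_BinNeighboursUsedBins2D : Prop := ∀ (ibin : Int) (jbin : Int) (usedbins : List (List Int)), Dom_BinNeighboursUsedBins2D ibin jbin usedbins → Spec_BinNeighboursUsedBins2D ibin jbin usedbins (BinNeighboursUsedBins2D ibin jbin usedbins)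

-- ===== LEMMAS AND PROOFS =====

theorem pvRange3 (t : Int) : PySem.List.pyRange (t - 1) (t + 2) 1 = [t - 1, t, t + 1] := by
  rw [PySem.List.pyRange_one_cons (by omega), PySem.List.pyRange_one_cons (by omega),
      PySem.List.pyRange_one_cons (by omega), PySem.List.pyRange_one_eq_nil (by omega)]
  norm_num

theorem pvInnerSide (u : List (List Int)) (ibin jbin i : Int) (hne : i ≠ ibin) :
    ((PySem.List.pyRange (jbin - 1) (jbin + 2) 1).any (fun j =>
        if j < 0 ∨ j ≥ ((PySem.List.pyGetD u i []).length : Int) then false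
        else if ibin = i ∧ jbin = j then false
        else if 0 < |i - ibin| ∧ 0 < |j - jbin| then false
        else PySem.List.pyGetD (PySem.List.pyGetD u i []) j 0 == 1))
    = (decide (0 ≤ jbin) && decide (jbin < ((PySem.List.pyGetD u i []).length : Int)) &&
        (PySem.List.pyGetD (PySem.List.pyGetD u i []) jbin 0 == 1)) := by
  rw [pvRange3]
  have h1 : ¬(ibin = i) := fun h => hne h.symm
  have hd : (0:Int) < |i - ibin| := by rw [abs_pos]; omega
  by_cases hc : jbin < 0 ∨ jbin ≥ ((PySem.List.pyGetD u i []).length : Int)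
  · rcases hc with h | h
    · simp [h1, hd, show ¬(0 ≤ jbin) by omega]
    · simp [h1, hd, show ¬(jbin < ((PySem.List.pyGetD u i []).length : Int)) by omega]
  · simp [h1, hd, show (0:Int) ≤ jbin from by omega,
      show jbin < ((PySem.List.pyGetD u i []).length : Int) from by omega,
      show ¬(jbin < 0) by omega,
      show ¬(jbin ≥ ((PySem.List.pyGetD u i []).length : Int)) by omega]

theorem pvInnerMid (u : List (List Int)) (ibin jbin : Int) :
    ((PySem.List.pyRange (jbin - 1) (jbin + 2) 1).any (fun j =>
        if j < 0 ∨ j ≥ ((PySem.List.pyGetD u ibin []).length : Int) then false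
        else if ibin = ibin ∧ jbin = j then false
        else if 0 < |ibin - ibin| ∧ 0 < |j - jbin| then false
        else PySem.List.pyGetD (PySem.List.pyGetD u ibin []) j 0 == 1))
    = ((decide (0 ≤ jbin - 1) && decide (jbin - 1 < ((PySem.List.pyGetD u ibin []).length : Int)) &&
         (PySem.List.pyGetD (PySem.List.pyGetD u ibin []) (jbin - 1) 0 == 1)) ||
       (decide (0 ≤ jbin + 1) && decide (jbin + 1 < ((PySem.List.pyGetD u ibin []).length : Int)) &&
         (PySem.List.pyGetD (PySem.List.pyGetD u ibin []) (jbin + 1) 0 == 1))) := by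
  rw [pvRange3]
  have hz : ¬((0:Int) < |ibin - ibin|) := by simp
  have s1 : ¬(jbin = jbin - 1) := by omega
  have s3 : ¬(jbin = jbin + 1) := by omega
  set L : Int := ((PySem.List.pyGetD u ibin []).length : Int) with hL
  by_cases p1 : 0 ≤ jbin - 1 ∧ jbin - 1 < L <;> by_cases p3 : 0 ≤ jbin + 1 ∧ jbin + 1 < L
  · have c1 : ¬(jbin - 1 < 0 ∨ jbin - 1 ≥ L) := by omega
    have c3 : ¬(jbin + 1 < 0 ∨ jbin + 1 ≥ L) := by omega
    simp [s1, s3, show ¬(jbin < 1) from by omega, show ¬(L < jbin) from by omega,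
      show ¬(jbin + 1 < 0) from by omega, show ¬(L ≤ jbin + 1) from by omega,
      show (1:Int) ≤ jbin from by omega, show jbin ≤ L from by omega,
      show (0:Int) ≤ jbin + 1 from by omega, show jbin + 1 < L from by omega]
  · have c1 : ¬(jbin - 1 < 0 ∨ jbin - 1 ≥ L) := by omega
    have c3 : jbin + 1 < 0 ∨ jbin + 1 ≥ L := by omega
    have g3 : (!decide (jbin + 1 < 0) && !decide (L ≤ jbin + 1)) = false := by
      rw [Bool.and_eq_false_iff]
      simp only [Bool.not_eq_false', decide_eq_true_eq]
      omega
    simp [s1, s3, g3, show ¬(jbin < 1) from by omega, show ¬(L < jbin) from by omega,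
      show (1:Int) ≤ jbin from by omega, show jbin ≤ L from by omega]
    intros; omega
  · have c1 : jbin - 1 < 0 ∨ jbin - 1 ≥ L := by omega
    have c3 : ¬(jbin + 1 < 0 ∨ jbin + 1 ≥ L) := by omega
    have g1 : (!decide (jbin < 1) && !decide (L < jbin)) = false := by
      rw [Bool.and_eq_false_iff]
      simp only [Bool.not_eq_false', decide_eq_true_eq]
      omega
    have g1r : (decide (1 ≤ jbin) && decide (jbin ≤ L)) = false := by
      rw [Bool.and_eq_false_iff]
      simp only [decide_eq_false_iff_not]
      omega
    simp [s1, s3, g1, g1r, show ¬(jbin + 1 < 0) from by omega,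
      show ¬(L ≤ jbin + 1) from by omega]
    intros; omega
  · have c1 : jbin - 1 < 0 ∨ jbin - 1 ≥ L := by omega
    have c3 : jbin + 1 < 0 ∨ jbin + 1 ≥ L := by omega
    have g1 : (!decide (jbin < 1) && !decide (L < jbin)) = false := by
      rw [Bool.and_eq_false_iff]
      simp only [Bool.not_eq_false', decide_eq_true_eq]
      omega
    have g3 : (!decide (jbin + 1 < 0) && !decide (L ≤ jbin + 1)) = false := by
      rw [Bool.and_eq_false_iff]
      simp only [Bool.not_eq_false', decide_eq_true_eq]
      omega
    have g1r : (decide (1 ≤ jbin) && decide (jbin ≤ L)) = false := by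
      rw [Bool.and_eq_false_iff]
      simp only [decide_eq_false_iff_not]
      omega
    simp [s1, s3, g1, g3, g1r]
    intros; omega

theorem pvGuard (N : Int) (i : Int) (x : Bool) :
    (if i < 0 ∨ i ≥ N then false else x) = (decide (0 ≤ i) && decide (i < N) && x) := by
  by_cases h : i < 0 ∨ i ≥ N
  · rw [if_pos h]
    rcases h with h | h
    · simp [show ¬((0:Int) ≤ i) from by omega]
    · simp [show ¬(i < N) from by omega]
  · rw [if_neg h]
    simp [show (0:Int) ≤ i from by omega, show i < N from by omega]

theorem main_eq (ibin jbin : Int) (u : List (List Int)) :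
    BinNeighboursUsedBins2D ibin jbin u = BinNeighboursUsedBins2D_alt ibin jbin u := by
  unfold BinNeighboursUsedBins2D BinNeighboursUsedBins2D_alt
  rw [pvRange3, List.any_cons, List.any_cons, List.any_cons, List.any_nil]
  rw [pvInnerSide u ibin jbin (ibin - 1) (by omega), pvInnerMid u ibin jbin,
      pvInnerSide u ibin jbin (ibin + 1) (by omega)]
  rw [List.any_cons, List.any_cons, List.any_cons, List.any_cons, List.any_nil]
  simp only [pvCellUsed, show ibin + (-1 : Int) = ibin - 1 from by ring,
    show jbin + (0 : Int) = jbin from by ring, show jbin + (-1 : Int) = jbin - 1 from by ring]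
  rw [pvGuard, pvGuard, pvGuard]
  simp only [Bool.or_false, Bool.and_or_distrib_left]
  ac_rfl

-- ===== VERDICT (by name: the statement is the Claim_ definition above) =====
theorem BinNeighboursUsedBins2D_spec : Claim_equal_BinNeighboursUsedBins2D := by
  intro ibin jbin usedbins _
  show BinNeighboursUsedBins2D ibin jbin usedbins = BinNeighboursUsedBins2D_alt ibin jbin usedbins
  exact main_eq ibin jbin usedbins
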